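-- pv_equiv track=rewrite | github.com/martinstd96/algoritmos1-7540 | TP2/fractales.py | distribuir_granos
-- ===== SOURCE A (Python) =====
-- def distribuir_granos(dimension,tablero,posicion,cant):
-- 	"""
--     Distribuye los granos de arena del tablaro segun la dimension del
--     mismo y la posicion en la que se encuntren los granos y su cantidad.
--     """
-- 	ancho,alto=dimension
-- 	columna,fila=posicion
-- 	distribucion=cant//4
-- 	sobrante=cant%4
-- 	for f in range(fila-1,fila+2):
-- 		if (f>=0 and f<alto) and f!=fila:
-- 			tablero[columna,f]=tablero.get((columna,f),0)+distribucion
-- 	for c in range(columna-1,columna+2):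
-- 		if (c>= 0 and c<ancho) and c!=columna:
-- 			tablero[c,fila]=tablero.get((c,fila),0)+distribucion
-- 	tablero[columna,fila]=sobrante
-- 	return tablero
-- ===== SOURCE B (Python) =====
-- def distribuir_granos(dimension, tablero, posicion, cant):
--     ancho, alto = dimension
--     col, fila = posicion
--     q, r = divmod(cant, 4)
--     delta = {(col, nf): q for nf in (fila - 1, fila + 1) if 0 <= nf < alto}
--     delta.update({(nc, fila): q for nc in (col - 1, col + 1) if 0 <= nc < ancho})
--     nuevo = {k: v + delta.pop(k, 0) for k, v in tablero.items()}
--     nuevo.update(delta)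
--     nuevo[col, fila] = r
--     tablero.clear()
--     tablero.update(nuevo)
--     return tablero
-- ===== Notes on version B (the rewrite author's own statement) =====
-- stated objective: alternative
-- what changed: Instead of A's four sequential in-place read-modify-write dict assignments driven by two range loops, B first builds a delta map of the in-bounds neighbor contributions and then rebuilds the board in a single traversal (adding and consuming deltas as it passes each cell, appending the unconsumed ones), finally setting the center to the remainder.
import Mathlib
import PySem

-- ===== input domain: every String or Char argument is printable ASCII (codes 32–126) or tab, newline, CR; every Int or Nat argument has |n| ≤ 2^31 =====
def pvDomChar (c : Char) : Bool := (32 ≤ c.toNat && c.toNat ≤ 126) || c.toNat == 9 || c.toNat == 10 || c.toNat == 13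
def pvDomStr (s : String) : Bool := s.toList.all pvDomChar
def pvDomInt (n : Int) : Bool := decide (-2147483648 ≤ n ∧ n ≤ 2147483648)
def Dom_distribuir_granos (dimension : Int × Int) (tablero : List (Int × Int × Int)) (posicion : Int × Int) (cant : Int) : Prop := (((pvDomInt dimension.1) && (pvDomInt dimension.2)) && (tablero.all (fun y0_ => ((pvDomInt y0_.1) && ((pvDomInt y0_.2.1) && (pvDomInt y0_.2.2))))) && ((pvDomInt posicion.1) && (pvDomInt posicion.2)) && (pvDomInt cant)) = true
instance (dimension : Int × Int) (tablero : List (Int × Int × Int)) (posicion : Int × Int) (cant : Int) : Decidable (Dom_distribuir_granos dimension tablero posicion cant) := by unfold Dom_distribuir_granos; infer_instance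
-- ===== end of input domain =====

-- B rebuilds the board in one traversal against a precomputed neighbor-delta map instead of
-- A's four in-place read-modify-write dict assignments (objective: alternative algorithm).
-- Both Pythons mutate `tablero` in place to the same final contents; the theorems are about
-- the returned dict.

-- ===== PORT A =====
-- Python dict get((c,f),0): first match in the association list, default 0. Exact.
def pvDGet : List (Int × Int × Int) → Int × Int → Int
  | [], _ => 0
  | (c, f, v) :: t, k => if c = k.1 ∧ f = k.2 then v else pvDGet t k

-- Python dict assignment d[c,f]=v: overwrite the first matching key in place, else append. Exact.
def pvDSet : List (Int × Int × Int) → Int × Int → Int → List (Int × Int × Int)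
  | [], k, v => [(k.1, k.2, v)]
  | (c, f, w) :: t, k, v =>
      if c = k.1 ∧ f = k.2 then (c, f, v) :: t else (c, f, w) :: pvDSet t k v

def distribuir_granos (dimension : Int × Int) (tablero : List (Int × Int × Int)) (posicion : Int × Int) (cant : Int) : List (Int × Int × Int) :=
  let ancho := dimension.1
  let alto := dimension.2
  let columna := posicion.1
  let fila := posicion.2
  let distribucion := PySem.Int.floordiv cant 4
  let sobrante := PySem.Int.mod cant 4
  let t1 := (PySem.List.pyRange (fila - 1) (fila + 2) 1).foldl (fun t f =>
      if (0 ≤ f ∧ f < alto) ∧ f ≠ fila then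
        pvDSet t (columna, f) (pvDGet t (columna, f) + distribucion) else t) tablero
  let t2 := (PySem.List.pyRange (columna - 1) (columna + 2) 1).foldl (fun t c =>
      if (0 ≤ c ∧ c < ancho) ∧ c ≠ columna then
        pvDSet t (c, fila) (pvDGet t (c, fila) + distribucion) else t) t1
  pvDSet t2 (columna, fila) sobrante

-- ===== PORT B =====
-- delta.pop(k, 0): value of the first entry with key k (0 if absent), and the list with
-- that entry removed. Exact.
def pvDPop : List (Int × Int × Int) → Int × Int → Int × List (Int × Int × Int)
  | [], _ => (0, [])
  | (a, b, v) :: t, k =>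
      if a = k.1 ∧ b = k.2 then (v, t)
      else
        let p := pvDPop t k
        (p.1, (a, b, v) :: p.2)

-- Source B: build the delta map of in-bounds neighbor contributions, rebuild the board in one
-- pass consuming deltas, append the unconsumed deltas (`nuevo.update(delta)`: exact as an
-- append since, on Pre_, the remaining delta keys are absent from the rebuilt list), set the
-- center to the remainder.
def distribuir_granos_alt (dimension : Int × Int) (tablero : List (Int × Int × Int)) (posicion : Int × Int) (cant : Int) : List (Int × Int × Int) :=
  let ancho := dimension.1
  let alto := dimension.2
  let col := posicion.1
  let fila := posicion.2
  let q := PySem.Int.floordiv cant 4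
  let r := PySem.Int.mod cant 4
  let delta : List (Int × Int × Int) :=
    (([fila - 1, fila + 1].filter (fun nf => decide (0 ≤ nf ∧ nf < alto))).map (fun nf => (col, nf, q)))
      ++ (([col - 1, col + 1].filter (fun nc => decide (0 ≤ nc ∧ nc < ancho))).map (fun nc => (nc, fila, q)))
  let st := tablero.foldl (fun (s : List (Int × Int × Int) × List (Int × Int × Int)) e =>
      let p := pvDPop s.2 (e.1, e.2.1)
      (s.1 ++ [(e.1, e.2.1, e.2.2 + p.1)], p.2)) ([], delta)
  pvDSet (st.1 ++ st.2) (col, fila) r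

-- ===== PRECONDITION & SPEC =====
-- Pre_ excludes association lists with duplicate keys: `tablero` is a Python dict, whose
-- keys are always distinct, so no Python input is excluded.
def Pre_distribuir_granos (dimension : Int × Int) (tablero : List (Int × Int × Int)) (posicion : Int × Int) (cant : Int) : Prop :=
  (tablero.map (fun e => (e.1, e.2.1))).Nodup
instance (dimension : Int × Int) (tablero : List (Int × Int × Int)) (posicion : Int × Int) (cant : Int) : Decidable (Pre_distribuir_granos dimension tablero posicion cant) := by unfold Pre_distribuir_granos; infer_instance

def pvWitness_distribuir_granos : (Int × Int) × (List (Int × Int × Int)) × (Int × Int) × Int :=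
  ((3, 3), [(1, 1, 5), (0, 1, 2)], (1, 1), 7)

def Spec_distribuir_granos (dimension : Int × Int) (tablero : List (Int × Int × Int)) (posicion : Int × Int) (cant : Int) (out : List (Int × Int × Int)) : Prop := out = distribuir_granos_alt dimension tablero posicion cant
instance (dimension : Int × Int) (tablero : List (Int × Int × Int)) (posicion : Int × Int) (cant : Int) (out : List (Int × Int × Int)) : Decidable (Spec_distribuir_granos dimension tablero posicion cant out) := by unfold Spec_distribuir_granos; infer_instance

-- ===== CLAIM (what is proved, stated in full; the proofs are below) =====
def Claim_equal_distribuir_granos : Prop := ∀ (dimension : Int × Int) (tablero : List (Int × Int × Int)) (posicion : Int × Int) (cant : Int), Dom_distribuir_granos dimension tablero posicion cant → Pre_distribuir_granos dimension tablero posicion cant → Spec_distribuir_granos dimension tablero posicion cant (distribuir_granos dimension tablero posicion cant)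


-- ===== LEMMAS AND PROOFS =====

def pvKey (e : Int × Int × Int) : Int × Int := (e.1, e.2.1)

-- entries of t, each bumped by q where its key lies in ds
def pvBump (ds : List (Int × Int)) (q : Int) (t : List (Int × Int × Int)) : List (Int × Int × Int) :=
  t.map (fun e => if pvKey e ∈ ds then (e.1, e.2.1, e.2.2 + q) else e)

-- fresh keys of ds, appended with value q
def pvNews (t : List (Int × Int × Int)) (ds : List (Int × Int)) (q : Int) : List (Int × Int × Int) :=
  (ds.filter (fun k => decide (k ∉ t.map pvKey))).map (fun k => (k.1, k.2, q))

theorem pvRange3 (a : Int) : PySem.List.pyRange (a - 1) (a + 2) 1 = [a - 1, a, a + 1] := by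
  rw [PySem.List.pyRange_one]
  have h : ((a + 2) - (a - 1)).toNat = 3 := by omega
  rw [h]
  simp [List.range_succ]
  omega

theorem get_absent (k : Int × Int) : ∀ t : List (Int × Int × Int),
    k ∉ t.map pvKey → pvDGet t k = 0 := by
  intro t
  induction t with
  | nil => intro _; rfl
  | cons e t ih =>
    obtain ⟨a, b, v⟩ := e
    intro h
    simp only [List.map_cons, List.mem_cons, pvKey, not_or] at h
    rw [pvDGet, if_neg, ih h.2]
    intro hc
    exact h.1 (by ext <;> simp [hc.1, hc.2])

theorem set_absent (k : Int × Int) (v : Int) : ∀ t : List (Int × Int × Int),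
    k ∉ t.map pvKey → pvDSet t k v = t ++ [(k.1, k.2, v)] := by
  intro t
  induction t with
  | nil => intro _; rfl
  | cons e t ih =>
    obtain ⟨a, b, w⟩ := e
    intro h
    simp only [List.map_cons, List.mem_cons, pvKey, not_or] at h
    rw [pvDSet, if_neg, ih h.2]
    · rfl
    · intro hc
      exact h.1 (by ext <;> simp [hc.1, hc.2])

theorem bump_absent (ds : List (Int × Int)) (q : Int) : ∀ t : List (Int × Int × Int),
    (∀ e ∈ t, pvKey e ∉ ds) → pvBump ds q t = t := by
  intro t h
  unfold pvBump
  rw [List.map_congr_left (g := id), List.map_id]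
  intro e he
  have h' : (e.1, e.2.1) ∉ ds := h e he
  simp [pvKey, h']

theorem keys_bump (ds : List (Int × Int)) (q : Int) (t : List (Int × Int × Int)) :
    (pvBump ds q t).map pvKey = t.map pvKey := by
  unfold pvBump
  rw [List.map_map, List.map_congr_left]
  intro e _
  by_cases h : (e.1, e.2.1) ∈ ds <;> simp [Function.comp, pvKey, h]

theorem bump_bump (ds : List (Int × Int)) (k : Int × Int) (q : Int)
    (t : List (Int × Int × Int)) (hk : k ∉ ds) :
    pvBump ds q (pvBump [k] q t) = pvBump (k :: ds) q t := by
  unfold pvBump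
  rw [List.map_map, List.map_congr_left]
  intro e _
  by_cases h1 : (e.1, e.2.1) = k
  · have h2 : (e.1, e.2.1) ∉ ds := h1 ▸ hk
    simp [Function.comp, pvKey, h1, h2, hk]
  · by_cases h2 : (e.1, e.2.1) ∈ ds <;> simp [Function.comp, pvKey, h1, h2]

theorem upd_present (k : Int × Int) (q : Int) : ∀ t : List (Int × Int × Int),
    (t.map pvKey).Nodup → k ∈ t.map pvKey →
    pvDSet t k (pvDGet t k + q) = pvBump [k] q t := by
  intro t
  induction t with
  | nil => intro _ h; simp at h
  | cons e t ih =>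
    obtain ⟨a, b, v⟩ := e
    intro hnd hm
    simp only [List.map_cons, List.nodup_cons] at hnd
    by_cases h : (a, b) = k
    · have hget : pvDGet ((a, b, v) :: t) k = v := by
        rw [pvDGet, if_pos ⟨by rw [← h], by rw [← h]⟩]
      have hset : pvDSet ((a, b, v) :: t) k (v + q) = (a, b, v + q) :: t := by
        rw [pvDSet, if_pos ⟨by rw [← h], by rw [← h]⟩]
      have hkey : pvKey (a, b, v) = k := h
      have tbump : pvBump [k] q t = t := by
        apply bump_absent
        intro e' he'
        simp only [List.mem_singleton]
        intro hc
        exact hnd.1 (by rw [hkey, ← hc]; exact List.mem_map_of_mem he')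
      have hb : pvBump [k] q ((a, b, v) :: t) = (a, b, v + q) :: t := by
        unfold pvBump at tbump ⊢
        simp only [List.map_cons]
        rw [if_pos (List.mem_singleton.2 hkey), tbump]
      rw [hget, hset, hb]
    · have hne : ¬(a = k.1 ∧ b = k.2) := by
        intro hc; exact h (by ext <;> simp [hc.1, hc.2])
      have hm' : k ∈ t.map pvKey := by
        rcases (List.mem_cons).1 hm with h1 | h1
        · exact absurd h1.symm (by simpa [pvKey] using h)
        · exact h1
      rw [pvDGet, if_neg hne, pvDSet, if_neg hne, ih hnd.2 hm']
      unfold pvBump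
      simp only [List.map_cons]
      rw [if_neg]
      simp only [List.mem_singleton, pvKey]
      intro hc
      exact h hc

-- A's loop body, iterated over a list of keys
theorem foldA (q : Int) : ∀ (ds : List (Int × Int)) (t : List (Int × Int × Int)),
    (t.map pvKey).Nodup → ds.Nodup →
    ds.foldl (fun t k => pvDSet t k (pvDGet t k + q)) t = pvBump ds q t ++ pvNews t ds q := by
  intro ds
  induction ds with
  | nil =>
    intro t _ _
    simp [pvBump, pvNews]
  | cons k ds ih =>
    intro t hnd hds
    simp only [List.nodup_cons] at hds
    rw [List.foldl_cons]
    by_cases hm : k ∈ t.map pvKey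
    · rw [upd_present k q t hnd hm]
      rw [ih _ (by rw [keys_bump]; exact hnd) hds.2]
      rw [bump_bump ds k q t hds.1]
      congr 1
      · unfold pvNews
        rw [keys_bump]
        congr 1
        rw [List.filter_cons_of_neg (by simp [hm])]
    · rw [get_absent k t hm, zero_add, set_absent k q t hm]
      have hnd' : ((t ++ [(k.1, k.2, q)]).map pvKey).Nodup := by
        simp only [List.map_append, List.map_cons, List.map_nil]
        refine List.Nodup.append hnd (List.nodup_singleton _) ?_
        intro x hx hx2
        simp only [List.mem_singleton] at hx2
        subst hx2
        exact hm (by simpa [pvKey] using hx)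
      rw [ih _ hnd' hds.2]
      have e1 : pvBump ds q (t ++ [(k.1, k.2, q)]) = pvBump ds q t ++ [(k.1, k.2, q)] := by
        unfold pvBump
        rw [List.map_append]
        congr 1
        simp [pvKey, hds.1]
      have e2 : pvBump (k :: ds) q t = pvBump ds q t := by
        unfold pvBump
        apply List.map_congr_left
        intro e he
        have : pvKey e ≠ k := by
          intro hc
          exact hm (hc ▸ List.mem_map_of_mem he)
        simp [List.mem_cons, this]
      have e3 : pvNews (t ++ [(k.1, k.2, q)]) ds q = pvNews t ds q := by
        unfold pvNews
        congr 1
        apply List.filter_congr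
        intro k' hk'
        have hne : k' ≠ k := fun hc => hds.1 (hc ▸ hk')
        simp [pvKey, hne]
      have e4 : pvNews t (k :: ds) q = (k.1, k.2, q) :: pvNews t ds q := by
        unfold pvNews
        rw [List.filter_cons_of_pos (by simp [hm])]
        rfl
      rw [e1, e3, e2, e4]
      simp

theorem pop_fst (k : Int × Int) : ∀ d : List (Int × Int × Int), (pvDPop d k).1 = pvDGet d k := by
  intro d
  induction d with
  | nil => rfl
  | cons e d ih =>
    obtain ⟨a, b, v⟩ := e
    by_cases h : a = k.1 ∧ b = k.2 <;> simp [pvDPop, pvDGet, h, ih]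

theorem pop_sublist (k : Int × Int) : ∀ d : List (Int × Int × Int), List.Sublist (pvDPop d k).2 d := by
  intro d
  induction d with
  | nil => exact List.Sublist.refl _
  | cons e d ih =>
    obtain ⟨a, b, v⟩ := e
    by_cases h : a = k.1 ∧ b = k.2
    · simp only [pvDPop, if_pos h]
      exact List.sublist_cons_self _ _
    · simp only [pvDPop, if_neg h]
      exact ih.cons₂ _

theorem get_pop_ne (k k' : Int × Int) (hne : k' ≠ k) :
    ∀ d : List (Int × Int × Int), pvDGet (pvDPop d k).2 k' = pvDGet d k' := by
  intro d
  induction d with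
  | nil => rfl
  | cons e d ih =>
    obtain ⟨a, b, v⟩ := e
    by_cases h : a = k.1 ∧ b = k.2
    · simp only [pvDPop, if_pos h]
      rw [pvDGet, if_neg]
      intro hc
      exact hne (by ext <;> omega)
    · simp only [pvDPop, if_neg h]
      by_cases h2 : a = k'.1 ∧ b = k'.2 <;> simp [pvDGet, h2, ih]

theorem pop_filter (k : Int × Int) (p : Int × Int × Int → Bool) :
    ∀ d : List (Int × Int × Int), (d.map pvKey).Nodup →
      ((pvDPop d k).2).filter p
        = d.filter (fun de => !((de.1, de.2.1) == k) && p de) := by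
  intro d
  induction d with
  | nil => intro _; rfl
  | cons e d ih =>
    obtain ⟨a, b, v⟩ := e
    intro hnd
    simp only [List.map_cons, List.nodup_cons] at hnd
    by_cases h : a = k.1 ∧ b = k.2
    · have hk : ((a : Int), (b : Int)) = k := by ext <;> omega
      simp only [pvDPop, if_pos h]
      rw [List.filter_cons, if_neg (by simp [hk])]
      apply List.filter_congr
      intro de hde
      have : pvKey de ≠ k := by
        intro hc
        exact hnd.1 (by rw [show pvKey (a, b, v) = k from hk, ← hc]; exact List.mem_map_of_mem hde)
      simp only [pvKey] at this
      simp [this]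
    · simp only [pvDPop, if_neg h]
      rw [List.filter_cons, List.filter_cons]
      have hk : ¬(((a : Int), (b : Int)) = k) := by
        intro hc
        exact h ⟨by rw [← hc], by rw [← hc]⟩
      have hb : (!(((a, b, v).1, (a, b, v).2.1) == k)) = true := by simp [hk]
      simp only [hb, Bool.true_and]
      by_cases hp : p (a, b, v) = true <;> simp [hp, ih hnd.2]

theorem foldB : ∀ (t acc d : List (Int × Int × Int)),
    (t.map pvKey).Nodup → (d.map pvKey).Nodup →
    t.foldl (fun (s : List (Int × Int × Int) × List (Int × Int × Int)) e =>
        let p := pvDPop s.2 (e.1, e.2.1)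
        (s.1 ++ [(e.1, e.2.1, e.2.2 + p.1)], p.2)) (acc, d)
      = (acc ++ t.map (fun e => (e.1, e.2.1, e.2.2 + pvDGet d (e.1, e.2.1))),
         d.filter (fun de => decide ((de.1, de.2.1) ∉ t.map pvKey))) := by
  intro t
  induction t with
  | nil =>
    intro acc d _ _
    simp
  | cons e t ih =>
    intro acc d hnd hd
    simp only [List.map_cons, List.nodup_cons] at hnd
    rw [List.foldl_cons]
    show List.foldl _ (acc ++ [(e.1, e.2.1, e.2.2 + (pvDPop d (e.1, e.2.1)).1)],
        (pvDPop d (e.1, e.2.1)).2) t = _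
    rw [ih _ _ hnd.2 (((pop_sublist _ d).map pvKey).nodup hd)]
    simp only [Prod.mk.injEq]
    constructor
    · rw [pop_fst, List.map_cons, List.append_assoc, List.singleton_append]
      congr 2
      apply List.map_congr_left
      intro e2 he2
      have hne : ((e2.1 : Int), (e2.2.1 : Int)) ≠ (e.1, e.2.1) := by
        intro hc
        exact hnd.1 (by rw [show pvKey e = ((e2.1 : Int), (e2.2.1 : Int)) from hc.symm]
                        exact List.mem_map_of_mem he2)
      rw [get_pop_ne _ _ hne]
    · rw [pop_filter _ _ d hd]
      apply List.filter_congr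
      intro de _
      by_cases h1 : ((de.1 : Int), (de.2.1 : Int)) = (e.1, e.2.1) <;>
        by_cases h2 : ((de.1 : Int), (de.2.1 : Int)) ∈ t.map pvKey <;>
          simp [pvKey, h1, h2]

theorem get_const (q : Int) (k' : Int × Int) : ∀ ds : List (Int × Int),
    pvDGet (ds.map (fun k => (k.1, k.2, q))) k' = if k' ∈ ds then q else 0 := by
  intro ds
  induction ds with
  | nil => simp [pvDGet]
  | cons k ds ih =>
    simp only [List.map_cons]
    rw [pvDGet]
    by_cases h : k' = k
    · rw [if_pos ⟨by rw [h], by rw [h]⟩, if_pos (by simp [h])]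
    · rw [if_neg (by intro hc; exact h (by ext <;> omega)), ih]
      by_cases h2 : k' ∈ ds <;> simp [h, h2]

theorem foldl_if_filter {α : Type} (p : Int → Prop) [DecidablePred p] (g : α → Int → α) :
    ∀ (xs : List Int) (a : α),
      xs.foldl (fun a x => if p x then g a x else a) a
        = (xs.filter (fun x => decide (p x))).foldl g a := by
  intro xs
  induction xs with
  | nil => intro a; rfl
  | cons x xs ih =>
    intro a
    by_cases h : p x <;> simp [List.filter_cons, h, ih]

theorem filter3 (f a : Int) :
    ([f - 1, f, f + 1].filter (fun x => decide ((0 ≤ x ∧ x < a) ∧ x ≠ f)))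
      = [f - 1, f + 1].filter (fun x => decide (0 ≤ x ∧ x < a)) := by
  have h0 : ¬((0 ≤ f ∧ f < a) ∧ f ≠ f) := by simp
  have h1 : ((0 ≤ f - 1 ∧ f - 1 < a) ∧ f - 1 ≠ f) ↔ (0 ≤ f - 1 ∧ f - 1 < a) := by omega
  have h2 : ((0 ≤ f + 1 ∧ f + 1 < a) ∧ f + 1 ≠ f) ↔ (0 ≤ f + 1 ∧ f + 1 < a) := by omega
  by_cases ha : 0 ≤ f - 1 ∧ f - 1 < a <;> by_cases hb : 0 ≤ f + 1 ∧ f + 1 < a <;>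
    simp [List.filter_cons, h0, h1, h2, ha, hb]

theorem ds_nodup (col fila : Int) (pV pH : Int → Bool) :
    ((([fila - 1, fila + 1].filter pV).map (fun nf => ((col : Int), nf)))
      ++ (([col - 1, col + 1].filter pH).map (fun nc => (nc, (fila : Int))))).Nodup := by
  have hfull : ([((col : Int), fila - 1), (col, fila + 1), (col - 1, fila), (col + 1, fila)]).Nodup := by
    simp [List.nodup_cons, Prod.ext_iff]
    omega
  have s1 : (([fila - 1, fila + 1].filter pV).map (fun nf => ((col : Int), nf)))
      |>.Sublist [((col : Int), fila - 1), (col, fila + 1)] := by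
    simpa using (List.filter_sublist (p := pV) (l := [fila - 1, fila + 1])).map (fun nf => ((col : Int), nf))
  have s2 : (([col - 1, col + 1].filter pH).map (fun nc => (nc, (fila : Int))))
      |>.Sublist [((col : Int) - 1, (fila : Int)), (col + 1, fila)] := by
    simpa using (List.filter_sublist (p := pH) (l := [col - 1, col + 1])).map (fun nc => (nc, (fila : Int)))
  exact (s1.append s2).nodup (by simpa using hfull)

theorem main_eq (ancho alto col fila q : Int) (tab : List (Int × Int × Int))
    (hkeys : (tab.map pvKey).Nodup) :
    List.foldl (fun t c => if (0 ≤ c ∧ c < ancho) ∧ c ≠ col then pvDSet t (c, fila) (pvDGet t (c, fila) + q) else t)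
      (List.foldl (fun t f => if (0 ≤ f ∧ f < alto) ∧ f ≠ fila then pvDSet t (col, f) (pvDGet t (col, f) + q) else t)
        tab [fila - 1, fila, fila + 1])
      [col - 1, col, col + 1]
    = (List.foldl (fun (s : List (Int × Int × Int) × List (Int × Int × Int)) e =>
          let p := pvDPop s.2 (e.1, e.2.1)
          (s.1 ++ [(e.1, e.2.1, e.2.2 + p.1)], p.2))
        ([], (([fila - 1, fila + 1].filter (fun nf => decide (0 ≤ nf ∧ nf < alto))).map (fun nf => (col, nf, q)))
          ++ (([col - 1, col + 1].filter (fun nc => decide (0 ≤ nc ∧ nc < ancho))).map (fun nc => (nc, fila, q)))) tab).1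
      ++ (List.foldl (fun (s : List (Int × Int × Int) × List (Int × Int × Int)) e =>
          let p := pvDPop s.2 (e.1, e.2.1)
          (s.1 ++ [(e.1, e.2.1, e.2.2 + p.1)], p.2))
        ([], (([fila - 1, fila + 1].filter (fun nf => decide (0 ≤ nf ∧ nf < alto))).map (fun nf => (col, nf, q)))
          ++ (([col - 1, col + 1].filter (fun nc => decide (0 ≤ nc ∧ nc < ancho))).map (fun nc => (nc, fila, q)))) tab).2 := by
  have hdelta :
      (([fila - 1, fila + 1].filter (fun nf => decide (0 ≤ nf ∧ nf < alto))).map (fun nf => (col, nf, q)))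
        ++ (([col - 1, col + 1].filter (fun nc => decide (0 ≤ nc ∧ nc < ancho))).map (fun nc => (nc, fila, q)))
      = ((([fila - 1, fila + 1].filter (fun nf => decide (0 ≤ nf ∧ nf < alto))).map (fun nf => ((col : Int), nf)))
          ++ (([col - 1, col + 1].filter (fun nc => decide (0 ≤ nc ∧ nc < ancho))).map (fun nc => (nc, (fila : Int))))).map
            (fun k => (k.1, k.2, q)) := by
    simp only [List.map_append, List.map_map, Function.comp_def]
  have hnodup := ds_nodup col fila (fun nf => decide (0 ≤ nf ∧ nf < alto)) (fun nc => decide (0 ≤ nc ∧ nc < ancho))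
  have hdk : ((((([fila - 1, fila + 1].filter (fun nf => decide (0 ≤ nf ∧ nf < alto))).map (fun nf => ((col : Int), nf)))
          ++ (([col - 1, col + 1].filter (fun nc => decide (0 ≤ nc ∧ nc < ancho))).map (fun nc => (nc, (fila : Int))))).map
            (fun k => (k.1, k.2, q))).map pvKey).Nodup := by
    rw [List.map_map]
    have hco : (pvKey ∘ fun k : Int × Int => (k.1, k.2, q)) = id := by
      funext k; simp [pvKey]
    rw [hco, List.map_id]
    exact hnodup
  rw [foldl_if_filter (fun f => (0 ≤ f ∧ f < alto) ∧ f ≠ fila)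
        (fun t f => pvDSet t (col, f) (pvDGet t (col, f) + q)),
      foldl_if_filter (fun c => (0 ≤ c ∧ c < ancho) ∧ c ≠ col)
        (fun t c => pvDSet t (c, fila) (pvDGet t (c, fila) + q)),
      filter3 fila alto, filter3 col ancho,
      ← List.foldl_map (f := fun f : Int => ((col : Int), f))
        (g := fun (t : List (Int × Int × Int)) (k : Int × Int) => pvDSet t k (pvDGet t k + q)),
      ← List.foldl_map (f := fun c : Int => ((c : Int), (fila : Int)))
        (g := fun (t : List (Int × Int × Int)) (k : Int × Int) => pvDSet t k (pvDGet t k + q)),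
      ← List.foldl_append,
      foldA q _ tab hkeys hnodup,
      hdelta,
      foldB tab [] _ hkeys hdk]
  simp only [List.nil_append]
  congr 1
  · unfold pvBump
    apply List.map_congr_left
    intro e _
    rw [get_const]
    simp only [pvKey]
    by_cases hm : ((e.1 : Int), (e.2.1 : Int)) ∈
        ((([fila - 1, fila + 1].filter (fun nf => decide (0 ≤ nf ∧ nf < alto))).map (fun nf => ((col : Int), nf)))
          ++ (([col - 1, col + 1].filter (fun nc => decide (0 ≤ nc ∧ nc < ancho))).map (fun nc => (nc, (fila : Int)))))
    · rw [if_pos hm, if_pos hm]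
    · rw [if_neg hm, if_neg hm, add_zero]
  · rw [List.filter_map]
    unfold pvNews
    congr 1

-- ===== VERDICT (by name: the statement is the Claim_ definition above) =====
theorem distribuir_granos_spec : Claim_equal_distribuir_granos := by
  intro dim tab pos cant _ hpre
  obtain ⟨ancho, alto⟩ := dim
  obtain ⟨col, fila⟩ := pos
  have hkeys : (tab.map pvKey).Nodup := hpre
  unfold Spec_distribuir_granos
  simp only [distribuir_granos, distribuir_granos_alt, pvRange3]
  exact congrArg (fun z => pvDSet z (col, fila) (PySem.Int.mod cant 4))
    (main_eq ancho alto col fila (PySem.Int.floordiv cant 4) tab hkeys)
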